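-- pv_equiv track=rewrite | github.com/douglasalvesc/lfa | trabalho-1/main.py | funcao_transicao_estendida
-- ===== SOURCE A (Python) =====
-- def funcao_transicao(estado, caractere):
--     """
--     Implementa a função de transição (δ).
--     """
--     if estado == 'q0':
--         if caractere == 'a':
--             return 'q1'
--         elif caractere == 'b':
--             return 'q0'
--     elif estado == 'q1':
--         if caractere == 'a':
--             return 'q2'
--         elif caractere == 'b':
--             return 'q3'
--     elif estado == 'q2':
--         if caractere == 'a':
--             return 'q4'
--         elif caractere == 'b':
--             return 'q5'
--     elif estado == 'q3':
--         if caractere == 'a':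
--             return 'q6'
--         elif caractere == 'b':
--             return 'q7'
--     elif estado == 'q4':
--         if caractere == 'a':
--             return 'q4'
--         elif caractere == 'b':
--             return 'q5'
--     elif estado == 'q5':
--         if caractere == 'a':
--             return 'q6'
--         elif caractere == 'b':
--             return 'q7'
--     elif estado == 'q6':
--         if caractere == 'a':
--             return 'q2'
--         elif caractere == 'b':
--             return 'q3'
--     elif estado == 'q7':
--         if caractere == 'a':
--             return 'q1'
--         elif caractere == 'b':
--             return 'q0'
--     return "ESTADO_DE_ERRO"
--
-- def funcao_transicao_estendida(estado, palavra):
--     """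
--     Implementa a função de transição estendida (δ̂ ).
--     """
--     if not palavra:
--         return estado
--
--     prefixo_x = palavra[:-1]
--     ultimo_simbolo_a = palavra[-1]
--     estado_intermediario = funcao_transicao_estendida(estado, prefixo_x)
--     estado_final = funcao_transicao(estado_intermediario, ultimo_simbolo_a)
--     return estado_final
-- ===== SOURCE B (Python) =====
-- _DELTA = {
--     ('q0', 'a'): 'q1', ('q0', 'b'): 'q0',
--     ('q1', 'a'): 'q2', ('q1', 'b'): 'q3',
--     ('q2', 'a'): 'q4', ('q2', 'b'): 'q5',
--     ('q3', 'a'): 'q6', ('q3', 'b'): 'q7',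
--     ('q4', 'a'): 'q4', ('q4', 'b'): 'q5',
--     ('q5', 'a'): 'q6', ('q5', 'b'): 'q7',
--     ('q6', 'a'): 'q2', ('q6', 'b'): 'q3',
--     ('q7', 'a'): 'q1', ('q7', 'b'): 'q0',
-- }
--
-- def funcao_transicao_estendida(estado, palavra):
--     """Table-driven iterative DFA run: one dict lookup per character."""
--     estado_atual = estado
--     for caractere in palavra:
--         estado_atual = _DELTA.get((estado_atual, caractere), 'ESTADO_DE_ERRO')
--     return estado_atual
-- ===== Notes on version B (the rewrite author's own statement) =====
-- stated objective: alternative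
-- what changed: Replaced the right-recursive definition (recurse on palavra[:-1], then apply one transition via an if/elif chain) by an iterative left-to-right loop doing one lookup per character in a precomputed (state,symbol)->state transition table with an 'ESTADO_DE_ERRO' default.
import Mathlib
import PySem

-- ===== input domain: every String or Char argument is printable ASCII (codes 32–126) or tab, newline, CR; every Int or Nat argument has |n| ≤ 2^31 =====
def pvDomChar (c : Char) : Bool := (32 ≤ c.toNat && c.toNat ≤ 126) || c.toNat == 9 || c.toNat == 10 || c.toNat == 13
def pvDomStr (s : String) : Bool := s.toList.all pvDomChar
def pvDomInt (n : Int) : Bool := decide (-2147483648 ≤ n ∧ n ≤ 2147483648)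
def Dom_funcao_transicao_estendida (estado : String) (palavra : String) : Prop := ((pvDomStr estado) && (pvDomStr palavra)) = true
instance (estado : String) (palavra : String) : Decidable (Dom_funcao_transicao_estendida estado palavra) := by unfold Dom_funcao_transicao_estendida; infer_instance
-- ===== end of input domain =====

-- B replaces A's recursion on palavra[:-1] plus an if/elif transition chain by an
-- iterative left-to-right fold doing one lookup per character in a (state, symbol) -> state
-- transition-table dict with an 'ESTADO_DE_ERRO' default (alternative decomposition).


-- ===== PORT A =====
-- A's helper funcao_transicao: the literal if/elif chain (caractere is a one-char string
-- in Python; ported as Char, comparison with 'a'/'b' is exact)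
def funcao_transicao (estado : String) (caractere : Char) : String :=
  if estado = "q0" then
    if caractere = 'a' then "q1" else if caractere = 'b' then "q0" else "ESTADO_DE_ERRO"
  else if estado = "q1" then
    if caractere = 'a' then "q2" else if caractere = 'b' then "q3" else "ESTADO_DE_ERRO"
  else if estado = "q2" then
    if caractere = 'a' then "q4" else if caractere = 'b' then "q5" else "ESTADO_DE_ERRO"
  else if estado = "q3" then
    if caractere = 'a' then "q6" else if caractere = 'b' then "q7" else "ESTADO_DE_ERRO"
  else if estado = "q4" then
    if caractere = 'a' then "q4" else if caractere = 'b' then "q5" else "ESTADO_DE_ERRO"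
  else if estado = "q5" then
    if caractere = 'a' then "q6" else if caractere = 'b' then "q7" else "ESTADO_DE_ERRO"
  else if estado = "q6" then
    if caractere = 'a' then "q2" else if caractere = 'b' then "q3" else "ESTADO_DE_ERRO"
  else if estado = "q7" then
    if caractere = 'a' then "q1" else if caractere = 'b' then "q0" else "ESTADO_DE_ERRO"
  else "ESTADO_DE_ERRO"

-- A's recursion on the list of characters: palavra[:-1] = dropLast, palavra[-1] = getLast
def funcao_transicao_estendida_rec (estado : String) (cs : List Char) : String :=
  if h : cs = [] then estado
  else
    let prefixo_x := cs.dropLast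
    let ultimo_simbolo_a := cs.getLast h
    let estado_intermediario := funcao_transicao_estendida_rec estado prefixo_x
    funcao_transicao estado_intermediario ultimo_simbolo_a
termination_by cs.length
decreasing_by
  simp [List.length_dropLast]
  cases cs with
  | nil => exact absurd rfl h
  | cons a t => simp

def funcao_transicao_estendida (estado : String) (palavra : String) : String :=
  funcao_transicao_estendida_rec estado palavra.toList

-- ===== PORT B =====
-- B's transition table _DELTA: an insertion-ordered dict keyed by (state, symbol)
def pvDelta : PySem.Dict (String × Char) String := PySem.Dict.ofList
  [ (("q0", 'a'), "q1"),
    (("q0", 'b'), "q0"),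
    (("q1", 'a'), "q2"),
    (("q1", 'b'), "q3"),
    (("q2", 'a'), "q4"),
    (("q2", 'b'), "q5"),
    (("q3", 'a'), "q6"),
    (("q3", 'b'), "q7"),
    (("q4", 'a'), "q4"),
    (("q4", 'b'), "q5"),
    (("q5", 'a'), "q6"),
    (("q5", 'b'), "q7"),
    (("q6", 'a'), "q2"),
    (("q6", 'b'), "q3"),
    (("q7", 'a'), "q1"),
    (("q7", 'b'), "q0") ]

-- B: iterative left-to-right run, one table lookup (with default) per character
def funcao_transicao_estendida_alt (estado : String) (palavra : String) : String :=
  palavra.toList.foldl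
    (fun estado_atual caractere => pvDelta.getD (estado_atual, caractere) "ESTADO_DE_ERRO")
    estado

-- ===== PRECONDITION & SPEC =====
def Spec_funcao_transicao_estendida (estado : String) (palavra : String) (out : String) : Prop := out = funcao_transicao_estendida_alt estado palavra
instance (estado : String) (palavra : String) (out : String) : Decidable (Spec_funcao_transicao_estendida estado palavra out) := by unfold Spec_funcao_transicao_estendida; infer_instance

-- ===== CLAIM (what is proved, stated in full; the proofs are below) =====
def Claim_equal_funcao_transicao_estendida : Prop := ∀ (estado : String) (palavra : String), Dom_funcao_transicao_estendida estado palavra → Spec_funcao_transicao_estendida estado palavra (funcao_transicao_estendida estado palavra)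

-- ===== LEMMAS AND PROOFS =====
-- ofList inserts 16 distinct keys, so the items list is the literal list
theorem pvDelta_mk : pvDelta = PySem.Dict.mk
  [ (("q0", 'a'), "q1"),
    (("q0", 'b'), "q0"),
    (("q1", 'a'), "q2"),
    (("q1", 'b'), "q3"),
    (("q2", 'a'), "q4"),
    (("q2", 'b'), "q5"),
    (("q3", 'a'), "q6"),
    (("q3", 'b'), "q7"),
    (("q4", 'a'), "q4"),
    (("q4", 'b'), "q5"),
    (("q5", 'a'), "q6"),
    (("q5", 'b'), "q7"),
    (("q6", 'a'), "q2"),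
    (("q6", 'b'), "q3"),
    (("q7", 'a'), "q1"),
    (("q7", 'b'), "q0") ] := by rfl

-- lookup misses when the state component matches no table key
theorem pvDelta_missState (s : String) (c : Char)
    (h0 : "q0" ≠ s) (h1 : "q1" ≠ s) (h2 : "q2" ≠ s) (h3 : "q3" ≠ s)
    (h4 : "q4" ≠ s) (h5 : "q5" ≠ s) (h6 : "q6" ≠ s) (h7 : "q7" ≠ s) :
    pvDelta.getD (s, c) "ESTADO_DE_ERRO" = "ESTADO_DE_ERRO" := by
  have e0 : ("q0" == s) = false := beq_eq_false_iff_ne.mpr h0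
  have e1 : ("q1" == s) = false := beq_eq_false_iff_ne.mpr h1
  have e2 : ("q2" == s) = false := beq_eq_false_iff_ne.mpr h2
  have e3 : ("q3" == s) = false := beq_eq_false_iff_ne.mpr h3
  have e4 : ("q4" == s) = false := beq_eq_false_iff_ne.mpr h4
  have e5 : ("q5" == s) = false := beq_eq_false_iff_ne.mpr h5
  have e6 : ("q6" == s) = false := beq_eq_false_iff_ne.mpr h6
  have e7 : ("q7" == s) = false := beq_eq_false_iff_ne.mpr h7
  have pb : ∀ (a : String) (b : Char), ((a, b) == (s, c)) = (a == s && b == c) := fun a b => rfl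
  simp [pvDelta_mk, PySem.Dict.getD, PySem.Dict.get?, List.find?, pb,
        e0, e1, e2, e3, e4, e5, e6, e7]

-- lookup misses when the symbol is neither 'a' nor 'b'
theorem pvDelta_missChar (s : String) (c : Char)
    (ha : 'a' ≠ c) (hb : 'b' ≠ c) :
    pvDelta.getD (s, c) "ESTADO_DE_ERRO" = "ESTADO_DE_ERRO" := by
  have ea : ('a' == c) = false := beq_eq_false_iff_ne.mpr ha
  have eb : ('b' == c) = false := beq_eq_false_iff_ne.mpr hb
  have pb : ∀ (a : String) (b : Char), ((a, b) == (s, c)) = (a == s && b == c) := fun a b => rfl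
  simp [pvDelta_mk, PySem.Dict.getD, PySem.Dict.get?, List.find?, pb, ea, eb]

-- one step: A's if/elif chain computes exactly B's table lookup with default
theorem step_eq (s : String) (c : Char) :
    funcao_transicao s c = pvDelta.getD (s, c) "ESTADO_DE_ERRO" := by
  by_cases hs_q0 : s = "q0"
  · subst hs_q0
    by_cases ha : c = 'a'
    · subst ha; rfl
    · by_cases hb : c = 'b'
      · subst hb; rfl
      · have hm := pvDelta_missChar "q0" c (fun e => ha e.symm) (fun e => hb e.symm)
        simp [funcao_transicao, ha, hb, hm]
  by_cases hs_q1 : s = "q1"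
  · subst hs_q1
    by_cases ha : c = 'a'
    · subst ha; rfl
    · by_cases hb : c = 'b'
      · subst hb; rfl
      · have hm := pvDelta_missChar "q1" c (fun e => ha e.symm) (fun e => hb e.symm)
        simp [funcao_transicao, ha, hb, hm]
  by_cases hs_q2 : s = "q2"
  · subst hs_q2
    by_cases ha : c = 'a'
    · subst ha; rfl
    · by_cases hb : c = 'b'
      · subst hb; rfl
      · have hm := pvDelta_missChar "q2" c (fun e => ha e.symm) (fun e => hb e.symm)
        simp [funcao_transicao, ha, hb, hm]
  by_cases hs_q3 : s = "q3"
  · subst hs_q3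
    by_cases ha : c = 'a'
    · subst ha; rfl
    · by_cases hb : c = 'b'
      · subst hb; rfl
      · have hm := pvDelta_missChar "q3" c (fun e => ha e.symm) (fun e => hb e.symm)
        simp [funcao_transicao, ha, hb, hm]
  by_cases hs_q4 : s = "q4"
  · subst hs_q4
    by_cases ha : c = 'a'
    · subst ha; rfl
    · by_cases hb : c = 'b'
      · subst hb; rfl
      · have hm := pvDelta_missChar "q4" c (fun e => ha e.symm) (fun e => hb e.symm)
        simp [funcao_transicao, ha, hb, hm]
  by_cases hs_q5 : s = "q5"
  · subst hs_q5
    by_cases ha : c = 'a'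
    · subst ha; rfl
    · by_cases hb : c = 'b'
      · subst hb; rfl
      · have hm := pvDelta_missChar "q5" c (fun e => ha e.symm) (fun e => hb e.symm)
        simp [funcao_transicao, ha, hb, hm]
  by_cases hs_q6 : s = "q6"
  · subst hs_q6
    by_cases ha : c = 'a'
    · subst ha; rfl
    · by_cases hb : c = 'b'
      · subst hb; rfl
      · have hm := pvDelta_missChar "q6" c (fun e => ha e.symm) (fun e => hb e.symm)
        simp [funcao_transicao, ha, hb, hm]
  by_cases hs_q7 : s = "q7"
  · subst hs_q7
    by_cases ha : c = 'a'
    · subst ha; rfl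
    · by_cases hb : c = 'b'
      · subst hb; rfl
      · have hm := pvDelta_missChar "q7" c (fun e => ha e.symm) (fun e => hb e.symm)
        simp [funcao_transicao, ha, hb, hm]
  · have hm := pvDelta_missState s c (fun e => hs_q0 e.symm) (fun e => hs_q1 e.symm) (fun e => hs_q2 e.symm) (fun e => hs_q3 e.symm) (fun e => hs_q4 e.symm) (fun e => hs_q5 e.symm) (fun e => hs_q6 e.symm) (fun e => hs_q7 e.symm)
    simp [funcao_transicao, hs_q0, hs_q1, hs_q2, hs_q3, hs_q4, hs_q5, hs_q6, hs_q7, hm]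

theorem rec_eq_foldl (estado : String) (cs : List Char) :
    funcao_transicao_estendida_rec estado cs
      = cs.foldl (fun s c => pvDelta.getD (s, c) "ESTADO_DE_ERRO") estado := by
  induction cs using List.reverseRecOn with
  | nil => simp [funcao_transicao_estendida_rec]
  | append_singleton as a ih =>
      rw [funcao_transicao_estendida_rec]
      simp [ih, step_eq]

-- ===== VERDICT (by name: the statement is the Claim_ definition above) =====
theorem funcao_transicao_estendida_spec : Claim_equal_funcao_transicao_estendida := by
  intro estado palavra _
  unfold Spec_funcao_transicao_estendida funcao_transicao_estendida funcao_transicao_estendida_alt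
  exact rec_eq_foldl estado palavra.toList
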